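-- pv_equiv track=rewrite | github.com/kargibora/CS-CLIP | scripts/benchmark_batch_processing.py | create_test_captions
-- ===== SOURCE A (Python) =====
-- def create_test_captions(num_captions=1000):
--     """Generate test captions."""
--     templates = [
--         "A cat sitting on a mat in the garden.",
--         "The quick brown fox jumps over the lazy dog.",
--         "A beautiful sunset over the ocean with palm trees.",
--         "Children playing in the park on a sunny day.",
--         "A red car driving down a busy city street.",
--         "A delicious chocolate cake with strawberries on top.",
--         "An old man reading a newspaper on a bench.",
--         "A group of friends laughing and having fun.",
--         "Mountains covered with snow under a clear blue sky.",
--         "A laptop computer on a wooden desk with coffee.",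
--     ]
--
--     captions = []
--     for i in range(num_captions):
--         captions.append(templates[i % len(templates)])
--
--     return captions
-- ===== SOURCE B (Python) =====
-- def create_test_captions(num_captions=1000):
--     """Generate test captions."""
--     templates = [
--         "A cat sitting on a mat in the garden.",
--         "The quick brown fox jumps over the lazy dog.",
--         "A beautiful sunset over the ocean with palm trees.",
--         "Children playing in the park on a sunny day.",
--         "A red car driving down a busy city street.",
--         "A delicious chocolate cake with strawberries on top.",
--         "An old man reading a newspaper on a bench.",
--         "A group of friends laughing and having fun.",
--         "Mountains covered with snow under a clear blue sky.",
--         "A laptop computer on a wooden desk with coffee.",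
--     ]
--     return (templates * num_captions)[:num_captions]
-- ===== Notes on version B (the rewrite author's own statement) =====
-- stated objective: idiomatic
-- what changed: Replaces the per-index loop with modulo indexing by one bulk expression: repeat the template list num_captions times and slice to length num_captions.
import Mathlib
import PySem

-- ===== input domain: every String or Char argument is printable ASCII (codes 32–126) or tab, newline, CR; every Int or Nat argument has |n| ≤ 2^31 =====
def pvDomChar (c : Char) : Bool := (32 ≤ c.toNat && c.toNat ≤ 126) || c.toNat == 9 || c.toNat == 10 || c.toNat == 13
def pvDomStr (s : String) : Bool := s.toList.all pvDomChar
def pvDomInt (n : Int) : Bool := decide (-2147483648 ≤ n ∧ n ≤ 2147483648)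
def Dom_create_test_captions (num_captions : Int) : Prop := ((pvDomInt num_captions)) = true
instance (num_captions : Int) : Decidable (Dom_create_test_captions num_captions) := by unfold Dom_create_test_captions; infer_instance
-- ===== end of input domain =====

-- B replaces A's index loop with modulo lookup by one bulk expression (repeat the list, slice to length); more idiomatic, same cost.

-- The fixed caption templates (shared literal of both Pythons).
def pvTemplates : List String := [
  "A cat sitting on a mat in the garden.",
  "The quick brown fox jumps over the lazy dog.",
  "A beautiful sunset over the ocean with palm trees.",
  "Children playing in the park on a sunny day.",
  "A red car driving down a busy city street.",
  "A delicious chocolate cake with strawberries on top.",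
  "An old man reading a newspaper on a bench.",
  "A group of friends laughing and having fun.",
  "Mountains covered with snow under a clear blue sky.",
  "A laptop computer on a wooden desk with coffee."]

-- ===== PORT A =====
-- A: captions = []; for i in range(num_captions): captions.append(templates[i % len(templates)])
-- templates[i % 10] is always in range (i ≥ 0), so pyGetD with a default is exact here.
def create_test_captions (num_captions : Int) : List String :=
  (PySem.List.pyRange 0 num_captions 1).foldl
    (fun captions i =>
      captions ++ [PySem.List.pyGetD pvTemplates (PySem.Int.mod i (pvTemplates.length : Int)) ""])
    []

-- ===== PORT B =====
-- B: return (templates * num_captions)[:num_captions]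
def create_test_captions_alt (num_captions : Int) : List String :=
  PySem.List.slice ((List.replicate num_captions.toNat pvTemplates).flatten) none (some num_captions)

-- ===== PRECONDITION & SPEC =====
def Spec_create_test_captions (num_captions : Int) (out : List String) : Prop := out = create_test_captions_alt num_captions
instance (num_captions : Int) (out : List String) : Decidable (Spec_create_test_captions num_captions out) := by unfold Spec_create_test_captions; infer_instance

-- ===== CLAIM (what is proved, stated in full; the proofs are below) =====
def Claim_equal_create_test_captions : Prop := ∀ (num_captions : Int), Dom_create_test_captions num_captions → Spec_create_test_captions num_captions (create_test_captions num_captions)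

-- ===== LEMMAS AND PROOFS =====

-- Cycling through the flattened replication: element i of (replicate k T).flatten is T[i % 10].
theorem cycle_getD (k i : Nat) (h : i < k * 10) :
    ((List.replicate k pvTemplates).flatten).getD i "" = pvTemplates.getD (i % 10) "" := by
  induction k generalizing i with
  | zero => omega
  | succ k ih =>
    rw [List.replicate_succ, List.flatten_cons]
    by_cases hi : i < 10
    · rw [List.getD_append _ _ _ _ (by simp [pvTemplates]; omega)]
      congr 1
      omega
    · rw [List.getD_append_right _ _ _ _ (by simp [pvTemplates]; omega)]
      have : pvTemplates.length = 10 := by simp [pvTemplates]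
      rw [this, ih (i - 10) (by omega)]
      congr 1
      omega

theorem a_eq_map (m : Nat) :
    create_test_captions (m : Int) = (List.range m).map (fun i => pvTemplates.getD (i % 10) "") := by
  unfold create_test_captions
  rw [PySem.List.foldl_append_singleton_eq_map, PySem.List.pyRange_one, List.map_map]
  simp only [Int.sub_zero, Int.toNat_natCast]
  apply List.map_congr_left
  intro i _
  have h1 : (0 : Int) + (i : Int) = ((i : Nat) : Int) := by omega
  have h2 : (pvTemplates.length : Int) = ((10 : Nat) : Int) := by simp [pvTemplates]
  simp only [Function.comp_apply, h1, h2, PySem.Int.mod_natCast, PySem.List.pyGetD_natCast]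

theorem b_eq_map (m : Nat) :
    create_test_captions_alt (m : Int) = (List.range m).map (fun i => pvTemplates.getD (i % 10) "") := by
  unfold create_test_captions_alt
  rw [PySem.List.slice_to _ (by positivity)]
  simp only [Int.toNat_natCast]
  apply List.ext_getElem
  · simp [pvTemplates]; omega
  · intro i h1 h2
    have hlen : ((List.replicate m pvTemplates).flatten).length = m * 10 := by
      simp [pvTemplates]
    have him : i < m := by simpa using h2
    simp only [List.getElem_take, List.getElem_map, List.getElem_range]
    rw [List.getElem_eq_getD ""]
    exact cycle_getD m i (by omega)

-- ===== VERDICT (by name: the statement is the Claim_ definition above) =====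
theorem create_test_captions_spec : Claim_equal_create_test_captions := by
  intro n _
  unfold Spec_create_test_captions
  by_cases hn : 0 ≤ n
  · obtain ⟨m, rfl⟩ := Int.eq_ofNat_of_zero_le hn
    rw [a_eq_map, b_eq_map]
  · have h1 : PySem.List.pyRange 0 n 1 = [] := PySem.List.pyRange_one_eq_nil (by omega)
    have h2 : n.toNat = 0 := by omega
    simp [create_test_captions, create_test_captions_alt, h1, h2, PySem.List.slice]
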